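-- pv_equiv track=rewrite | github.com/harishavenue1/harishavenue1.github.io | programs/replaceCharInplace/python_code.py | replaced_string_3
-- ===== SOURCE A (Python) =====
-- def replaced_string_3(s):
--     count = 1
--     chars = list(s)
--
--     for i in range(len(chars)):
--
--         # Python: .lower() method for case-insensitive comparison
--         if chars[i].lower() == 'o':
--
--             # Python: * operator for string repetition
--             chars[i] = '&' * count
--             count += 1
--
--     return ''.join(chars)
-- ===== SOURCE B (Python) =====
-- def replaced_string_3(s):
--     # Split s into the maximal o/O-free segments (as char lists), then join them
--     # back with runs of '&' of increasing length (run i sits where the i-th o/O was).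
--     parts = [[]]
--     for ch in s:
--         if ch in 'oO':
--             parts.append([])
--         else:
--             parts[-1].append(ch)
--     out = parts[0]
--     for i in range(1, len(parts)):
--         out += ['&'] * i + parts[i]
--     return ''.join(out)
-- ===== Notes on version B (the rewrite author's own statement) =====
-- stated objective: alternative
-- what changed: A walks the character list by index, mutating each matched cell in place to a growing run under a running counter carried through the scan; B instead splits the string into its maximal segments free of the replaced letters and rejoins them with runs whose length is the segment's position, so no counter is threaded through the scan and nothing is mutated in place.
import Mathlib
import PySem

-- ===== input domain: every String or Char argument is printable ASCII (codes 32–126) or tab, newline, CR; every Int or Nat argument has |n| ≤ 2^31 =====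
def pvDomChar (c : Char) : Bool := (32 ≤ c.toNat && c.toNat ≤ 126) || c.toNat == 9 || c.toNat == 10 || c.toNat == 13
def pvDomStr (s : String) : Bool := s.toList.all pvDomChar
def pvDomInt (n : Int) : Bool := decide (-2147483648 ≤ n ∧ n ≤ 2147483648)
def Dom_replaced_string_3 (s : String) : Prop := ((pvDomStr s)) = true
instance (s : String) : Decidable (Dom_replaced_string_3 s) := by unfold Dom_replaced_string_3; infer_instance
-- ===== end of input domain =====

-- B replaces A's indexed in-place loop (counter, chars[i] mutation) by a split of the
-- string into its o/O-free segments rejoined with '&' runs of increasing length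
-- (objective: alternative decomposition, same cost).

-- ===== PORT A =====
-- body of A's for-loop: chars[i].lower() == 'o' → chars[i] = '&'*count; count += 1
def pvStepA (st : List (List Char) × Int) (i : Int) : List (List Char) × Int :=
  if PySem.Chars.lower (st.1.getD i.toNat []) = ['o'] then
    (st.1.set i.toNat (PySem.List.pyRepeat ['&'] st.2), st.2 + 1)
  else st

def replaced_string_3 (s : String) : String :=
  let chars : List (List Char) := s.toList.map (fun c => [c])  -- list(s); cells may later hold '&'*count
  let res := (PySem.List.pyRange 0 (chars.length : Int) 1).foldl pvStepA (chars, 1)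
  String.ofList res.1.flatten  -- ''.join(chars): concatenation of the cells

-- ===== PORT B =====
-- body of B's first loop: split into maximal o/O-free segments
def pvStepS (parts : List (List Char)) (c : Char) : List (List Char) :=
  if c = 'o' ∨ c = 'O' then parts ++ [[]]
  else parts.dropLast ++ [parts.getLastD [] ++ [c]]

-- body of B's second loop: out += '&' * i + parts[i]
def pvStepJ (parts : List (List Char)) (out : List Char) (i : Int) : List Char :=
  out ++ PySem.List.pyRepeat ['&'] i ++ parts.getD i.toNat []

def replaced_string_3_alt (s : String) : String :=
  let parts := s.toList.foldl pvStepS [[]]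
  let out := (PySem.List.pyRange 1 (parts.length : Int) 1).foldl (pvStepJ parts) (parts.getD 0 [])
  String.ofList out

-- ===== PRECONDITION & SPEC =====
def Spec_replaced_string_3 (s : String) (out : String) : Prop := out = replaced_string_3_alt s
instance (s : String) (out : String) : Decidable (Spec_replaced_string_3 s out) := by unfold Spec_replaced_string_3; infer_instance

-- ===== CLAIM (what is proved, stated in full; the proofs are below) =====
def Claim_equal_replaced_string_3 : Prop := ∀ (s : String), Dom_replaced_string_3 s → Spec_replaced_string_3 s (replaced_string_3 s)

-- ===== LEMMAS AND PROOFS =====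

-- common reference: the replacement, written as a structural recursion with counter k
def pvRef : List Char → Int → List Char
  | [], _ => []
  | c :: cs, k =>
    if c = 'o' ∨ c = 'O' then List.replicate k.toNat '&' ++ pvRef cs (k + 1)
    else c :: pvRef cs k

theorem pv_char_le_toNat (a b : Char) : a ≤ b ↔ a.toNat ≤ b.toNat := by
  rw [Char.le_def, Char.toNat, Char.toNat, UInt32.le_iff_toNat_le]

theorem pv_char_eq_toNat (a b : Char) : a = b ↔ a.toNat = b.toNat := by
  constructor
  · intro h; rw [h]
  · intro h; rw [← Char.ofNat_toNat a, h, Char.ofNat_toNat]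

theorem pv_lowerChar_eq_o (c : Char) : (PySem.Chars.lowerChar c = 'o') ↔ (c = 'o' ∨ c = 'O') := by
  unfold PySem.Chars.lowerChar PySem.Chars.isupper
  have e1 : 'A'.toNat = 65 := rfl
  have e2 : 'Z'.toNat = 90 := rfl
  have e3 : 'o'.toNat = 111 := rfl
  have e4 : 'O'.toNat = 79 := rfl
  have hA : ('A' ≤ c) ↔ 65 ≤ c.toNat := by rw [pv_char_le_toNat, e1]
  have hZ : (c ≤ 'Z') ↔ c.toNat ≤ 90 := by rw [pv_char_le_toNat, e2]
  split_ifs with h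
  · simp only [Bool.and_eq_true, decide_eq_true_eq, hA, hZ] at h
    rw [pv_char_eq_toNat, pv_char_eq_toNat c 'o', pv_char_eq_toNat c 'O', Char.toNat_ofNat]
    have hvalid : (c.toNat + 32).isValidChar := by left; omega
    rw [if_pos hvalid, e3, e4]
    omega
  · simp only [Bool.and_eq_true, decide_eq_true_eq, hA, hZ, not_and_or, not_le] at h
    rw [pv_char_eq_toNat c 'o', pv_char_eq_toNat c 'O', e3, e4]
    omega

-- ---- A side ----
-- structural version of A's loop over the remaining cells
def pvProcA : List (List Char) → Int → List (List Char) × Int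
  | [], k => ([], k)
  | cell :: rest, k =>
    if PySem.Chars.lower cell = ['o'] then
      let r := pvProcA rest (k + 1)
      (PySem.List.pyRepeat ['&'] k :: r.1, r.2)
    else
      let r := pvProcA rest k
      (cell :: r.1, r.2)

theorem pv_loopA (rest : List (List Char)) : ∀ (pre : List (List Char)) (k : Int),
    (PySem.List.pyRange (pre.length : Int) ((pre.length + rest.length : Nat) : Int) 1).foldl
      pvStepA (pre ++ rest, k)
    = (pre ++ (pvProcA rest k).1, (pvProcA rest k).2) := by
  induction rest with
  | nil => intro pre k; simp [PySem.List.pyRange, pvProcA]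
  | cons cell rest ih =>
    intro pre k
    have hlt : (pre.length : Int) < ((pre.length + (cell :: rest).length : Nat) : Int) := by
      simp
    rw [PySem.List.pyRange_one_cons hlt]
    have hget : (pre ++ cell :: rest).getD (pre.length : Int).toNat [] = cell := by
      rw [Int.toNat_natCast, List.getD_append_right pre _ [] pre.length (le_refl _)]
      simp
    have hset : ∀ x, (pre ++ cell :: rest).set (pre.length : Int).toNat x = pre ++ x :: rest := by
      intro x
      rw [Int.toNat_natCast, List.set_append_right _ _ (le_refl _)]
      simp
    simp only [List.foldl_cons, pvStepA, hget, hset]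
    by_cases hc : PySem.Chars.lower cell = ['o']
    · rw [if_pos hc]
      have h1 : pre ++ PySem.List.pyRepeat ['&'] k :: rest
          = (pre ++ [PySem.List.pyRepeat ['&'] k]) ++ rest := by simp
      have h2 : ((pre.length : Int) + 1)
          = (((pre ++ [PySem.List.pyRepeat ['&'] k]).length : Nat) : Int) := by simp
      have h3 : ((pre.length + (cell :: rest).length : Nat) : Int)
          = (((pre ++ [PySem.List.pyRepeat ['&'] k]).length + rest.length : Nat) : Int) := by
        simp; omega
      rw [h1, h2, h3, ih]
      simp [pvProcA, hc]
    · rw [if_neg hc]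
      have h1 : pre ++ cell :: rest = (pre ++ [cell]) ++ rest := by simp
      have h2 : ((pre.length : Int) + 1) = (((pre ++ [cell]).length : Nat) : Int) := by simp
      have h3 : ((pre.length + (cell :: rest).length : Nat) : Int)
          = (((pre ++ [cell]).length + rest.length : Nat) : Int) := by simp; omega
      rw [h1, h2, h3, ih]
      simp [pvProcA, hc]

theorem pv_procA_map (cs : List Char) : ∀ (k : Int),
    ((pvProcA (cs.map fun c => [c]) k).1).flatten = pvRef cs k := by
  induction cs with
  | nil => intro k; simp [pvProcA, pvRef]
  | cons c cs ih =>
    intro k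
    have hcond : (PySem.Chars.lower [c] = ['o']) ↔ (c = 'o' ∨ c = 'O') := by
      simp [PySem.Chars.lower, pv_lowerChar_eq_o]
    by_cases hc : c = 'o' ∨ c = 'O'
    · simp only [List.map_cons, pvProcA, if_pos (hcond.mpr hc), pvRef, if_pos hc,
        List.flatten_cons, ih, PySem.List.pyRepeat_singleton]
    · simp only [List.map_cons, pvProcA, if_neg (fun h => hc (hcond.mp h)), pvRef, if_neg hc,
        List.flatten_cons, ih, List.singleton_append]

-- ---- B side ----
-- structural version of B's first loop (split into o/O-free segments)
def pvSplitR : List Char → List Char → List (List Char)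
  | cur, [] => [cur]
  | cur, c :: cs => if c = 'o' ∨ c = 'O' then cur :: pvSplitR [] cs else pvSplitR (cur ++ [c]) cs

-- structural version of B's second loop past the first segment
def pvJoinTail : List (List Char) → Int → List Char
  | [], _ => []
  | p :: ps, k => PySem.List.pyRepeat ['&'] k ++ p ++ pvJoinTail ps (k + 1)

theorem pv_splitR_ne_nil (cs : List Char) : ∀ cur, pvSplitR cur cs ≠ [] := by
  induction cs with
  | nil => intro cur; simp [pvSplitR]
  | cons c cs ih =>
    intro cur
    by_cases hc : c = 'o' ∨ c = 'O' <;> simp [pvSplitR, hc, ih]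

theorem pv_splitLoop (cs : List Char) : ∀ (pss : List (List Char)) (cur : List Char),
    cs.foldl pvStepS (pss ++ [cur]) = pss ++ pvSplitR cur cs := by
  induction cs with
  | nil => intro pss cur; simp [pvSplitR]
  | cons c cs ih =>
    intro pss cur
    by_cases hc : c = 'o' ∨ c = 'O'
    · have hstep : pvStepS (pss ++ [cur]) c = (pss ++ [cur]) ++ [([] : List Char)] := by
        simp [pvStepS, hc]
      simp only [List.foldl_cons, hstep, ih]
      simp [pvSplitR, hc]
    · have : pvStepS (pss ++ [cur]) c = pss ++ [cur ++ [c]] := by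
        simp [pvStepS, hc]
      simp only [List.foldl_cons, this, ih]
      simp [pvSplitR, hc]

theorem pv_loopJ (tail : List (List Char)) : ∀ (pre : List (List Char)) (out : List Char),
    (PySem.List.pyRange (pre.length : Int) (((pre ++ tail).length : Nat) : Int) 1).foldl
      (pvStepJ (pre ++ tail)) out
    = out ++ pvJoinTail tail (pre.length : Int) := by
  induction tail with
  | nil => intro pre out; simp [PySem.List.pyRange, pvJoinTail]
  | cons cell tail ih =>
    intro pre out
    have hlt : (pre.length : Int) < (((pre ++ cell :: tail).length : Nat) : Int) := by
      simp
    rw [PySem.List.pyRange_one_cons hlt]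
    have hget : (pre ++ cell :: tail).getD (pre.length : Int).toNat [] = cell := by
      rw [Int.toNat_natCast, List.getD_append_right pre _ [] pre.length (le_refl _)]
      simp
    have h1 : pre ++ cell :: tail = (pre ++ [cell]) ++ tail := by simp
    have h2 : ((pre.length : Int) + 1) = (((pre ++ [cell]).length : Nat) : Int) := by simp
    simp only [List.foldl_cons, pvStepJ, hget]
    rw [h1, h2, ih]
    simp [pvJoinTail]

theorem pv_headJoin (cs : List Char) : ∀ (cur : List Char) (k : Int),
    (match pvSplitR cur cs with
     | [] => []
     | p :: ps => p ++ pvJoinTail ps k)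
    = cur ++ pvRef cs k := by
  induction cs with
  | nil => intro cur k; simp [pvSplitR, pvJoinTail, pvRef]
  | cons c cs ih =>
    intro cur k
    by_cases hc : c = 'o' ∨ c = 'O'
    · simp only [pvSplitR, pvRef, if_pos hc]
      obtain ⟨p, ps, hps⟩ : ∃ p ps, pvSplitR ([] : List Char) cs = p :: ps := by
        cases h : pvSplitR ([] : List Char) cs with
        | nil => exact absurd h (pv_splitR_ne_nil cs [])
        | cons p ps => exact ⟨p, ps, rfl⟩
      have := ih ([] : List Char) (k + 1)
      rw [hps] at this ⊢
      simp only [pvJoinTail, PySem.List.pyRepeat_singleton]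
      simp only [List.nil_append, zero_add] at this
      rw [List.append_assoc, this]
    · simp only [pvSplitR, pvRef, if_neg hc]
      rw [ih (cur ++ [c]) k]
      simp

-- ===== VERDICT (by name: the statement is the Claim_ definition above) =====
theorem replaced_string_3_spec : Claim_equal_replaced_string_3 := by
  intro s _
  unfold Spec_replaced_string_3 replaced_string_3 replaced_string_3_alt
  -- A side
  have hA : ∀ cs : List Char,
      ((PySem.List.pyRange 0 (((cs.map fun c => [c]).length : Nat) : Int) 1).foldl
        pvStepA ((cs.map fun c => [c]), 1)).1.flatten = pvRef cs 1 := by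
    intro cs
    have := pv_loopA (cs.map fun c => [c]) [] 1
    simp only [List.length_nil, Nat.cast_zero, List.nil_append, zero_add] at this
    rw [this]
    simp [pv_procA_map]
  -- B side
  have hB : ∀ cs : List Char,
      ((PySem.List.pyRange 1 (((cs.foldl pvStepS [[]]).length : Nat) : Int) 1).foldl
        (pvStepJ (cs.foldl pvStepS [[]])) ((cs.foldl pvStepS [[]]).getD 0 [])) = pvRef cs 1 := by
    intro cs
    have hsplit : cs.foldl pvStepS [[]] = pvSplitR [] cs := by
      have := pv_splitLoop cs [] []
      simpa using this
    obtain ⟨p, ps, hps⟩ : ∃ p ps, pvSplitR ([] : List Char) cs = p :: ps := by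
      cases h : pvSplitR ([] : List Char) cs with
      | nil => exact absurd h (pv_splitR_ne_nil cs [])
      | cons p ps => exact ⟨p, ps, rfl⟩
    rw [hsplit, hps]
    have hJ := pv_loopJ ps [p] p
    have hmain := pv_headJoin cs ([] : List Char) 1
    rw [hps] at hmain
    simp only [List.singleton_append, List.length_cons, List.length_nil, List.nil_append]
      at hJ hmain
    norm_num at hJ
    simp only [List.getD_cons_zero, List.length_cons]
    push_cast
    rw [hJ]
    exact hmain
  simp only [hA, hB]
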